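-- pv_equiv track=rewrite | github.com/sed3saaho/Romans-codility-Practice | Tuesdays-content/Question2.py | solution
-- ===== SOURCE A (Python) =====
-- def generate_permutations(digits, perm, used, result):
--     ##digits: List of digits (in this case, [A, B, C, D]).
--    ## perm: Current permutation being constructed.
--   ## used: List to track which digits have been used in the current permutation.
--   ##  result: List to store all valid permutations.
--
--
--     if len(perm) == len(digits):## if the length of the permutation is equal to the length of the digits, it is a valid permutation.
--         result.append(perm[:])# and then we append a copy of the permutation to the result list and return
--         return
--     #Recusive case: we are iterating through each digit in 'digits'. if 'used[i]' is False, it means 'digits[i]' has not been used in the current permutation.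
--     # We mark 'used[i]' as true ,append 'digits[i]' to 'perm' , recursively call the generate_permutations function recursively with the updated parameters and then
--     # backtrack(perm.pop()) and used[i] = False) to explore other permutations
--     for i in range(len(digits)):
--         if not used[i]:
--             used[i] = True
--             perm.append(digits[i])
--             generate_permutations(digits, perm, used, result)
--             perm.pop()
--             used[i] = False
--
-- def is_valid_time(hours, minutes):
--     return 0 <= hours < 24 and 0 <= minutes < 60
--
-- def solution(A, B, C, D):
--     # Parameters: A, B, C, D are four digits to form permatuations
--     digits = [A, B, C, D]
--     # Initialize a set to store all unique valid times
--     valid_times = set()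
--     # Initialize  permutations as a list to store all possible permutations
--     permutations = []  # List to store all possible permutationsljj
--     used = [False] * len(digits)
--     # Call the generate_permutations function with initial parameters
--     generate_permutations(digits, [], used, permutations)
--     ## iterates through each permutation , calculates hours and minutes from the
--       # permutation , checks if it forms a valid time  using is_valid_time and adds it to valid_times if valid
--     for perm in permutations:
--         hours = perm[0] * 10 + perm[1]
--         minutes = perm[2] * 10 + perm[3]
--
--         if is_valid_time(hours, minutes):
--             valid_times.add((hours, minutes))
--
--     ## and finally it returns the length of valid_times which represents the count of unique valid times
--     return len(valid_times)
-- ===== SOURCE B (Python) =====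
-- def solution(A, B, C, D):
--     # Pick the ordered pair of positions used for the hour, prune invalid hours early,
--     # then try the two remaining digits in both orders as the minute. No recursion,
--     # no permutation list, no used-mask backtracking.
--     digits = [A, B, C, D]
--     times = set()
--     for i in range(4):
--         for j in range(4):
--             if i == j:
--                 continue
--             hour = digits[i] * 10 + digits[j]
--             if not (0 <= hour < 24):
--                 continue
--             rest = [digits[k] for k in range(4) if k != i and k != j]
--             for minute in (rest[0] * 10 + rest[1], rest[1] * 10 + rest[0]):
--                 if 0 <= minute < 60:
--                     times.add((hour, minute))
--     return len(times)
-- ===== Notes on version B (the rewrite author's own statement) =====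
-- stated objective: simpler
-- what changed: B drops the recursive permutation generator (helper function, used-mask backtracking, full permutation list) and instead iterates over ordered index pairs for the hour digits, pruning invalid hours early, then tries the two leftover digits in both orders as the minute, collecting valid times in a set.
import Mathlib
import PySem

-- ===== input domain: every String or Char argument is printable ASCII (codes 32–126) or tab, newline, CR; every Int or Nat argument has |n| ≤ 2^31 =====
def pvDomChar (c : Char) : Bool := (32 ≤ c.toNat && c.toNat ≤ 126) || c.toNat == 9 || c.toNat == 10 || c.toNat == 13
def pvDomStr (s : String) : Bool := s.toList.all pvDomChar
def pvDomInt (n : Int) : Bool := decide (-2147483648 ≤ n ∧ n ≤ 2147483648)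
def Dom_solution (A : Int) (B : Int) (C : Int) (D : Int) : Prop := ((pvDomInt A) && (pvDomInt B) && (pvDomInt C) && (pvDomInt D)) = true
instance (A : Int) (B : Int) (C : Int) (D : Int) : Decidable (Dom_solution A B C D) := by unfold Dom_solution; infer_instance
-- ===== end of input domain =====

-- B replaces A's recursive permutation generator (helper recursion + used-mask backtracking
-- + full permutation list) by direct iteration over ordered index pairs for the hour with
-- early pruning, trying the two leftover digits both ways as the minute (objective: simpler).


-- ===== PORT A =====
-- generate_permutations: backtracking over an index range with a `used` mask; ported
-- functionally (the result is accumulated in the return value instead of the mutated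
-- `result` argument). fuel bounds the recursion depth (Python's depth is ≤ len(digits)+1).
def genPerms (fuel : Nat) (digits : List Int) (perm : List Int) (used : List Bool) : List (List Int) :=
  match fuel with
  | 0 => []
  | fuel + 1 =>
    if perm.length = digits.length then [perm]
    else
      (List.range digits.length).foldl (fun acc i =>
        if !(used.getD i false) then
          acc ++ genPerms fuel digits (perm ++ [digits.getD i 0]) (used.set i true)
        else acc) []

-- is_valid_time
def isValidTime (hours : Int) (minutes : Int) : Bool :=
  decide (0 ≤ hours ∧ hours < 24) && decide (0 ≤ minutes ∧ minutes < 60)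

def solution (A : Int) (B : Int) (C : Int) (D : Int) : Int :=
  let digits : List Int := [A, B, C, D]
  let used : List Bool := List.replicate digits.length false
  let permutations := genPerms (digits.length + 1) digits [] used
  let validTimes : PySem.Set (Int × Int) := permutations.foldl (fun s p =>
    let hours := PySem.List.pyGetD p 0 0 * 10 + PySem.List.pyGetD p 1 0
    let minutes := PySem.List.pyGetD p 2 0 * 10 + PySem.List.pyGetD p 3 0
    if isValidTime hours minutes then PySem.Set.add s (hours, minutes) else s)
    PySem.Set.empty
  (validTimes.length : Int)

-- ===== PORT B =====
def solution_alt (A : Int) (B : Int) (C : Int) (D : Int) : Int :=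
  let digits : List Int := [A, B, C, D]
  let times : PySem.Set (Int × Int) := (PySem.List.pyRange 0 4 1).foldl (fun s i =>
    (PySem.List.pyRange 0 4 1).foldl (fun s j =>
      if i = j then s
      else
        let hour := PySem.List.pyGetD digits i 0 * 10 + PySem.List.pyGetD digits j 0
        if ¬ (0 ≤ hour ∧ hour < 24) then s
        else
          let rest := ((PySem.List.pyRange 0 4 1).filter
              (fun k => decide (k ≠ i) && decide (k ≠ j))).map
            (fun k => PySem.List.pyGetD digits k 0)
          [PySem.List.pyGetD rest 0 0 * 10 + PySem.List.pyGetD rest 1 0,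
           PySem.List.pyGetD rest 1 0 * 10 + PySem.List.pyGetD rest 0 0].foldl (fun s minute =>
            if 0 ≤ minute ∧ minute < 60 then PySem.Set.add s (hour, minute) else s) s) s)
    PySem.Set.empty
  (times.length : Int)

-- ===== PRECONDITION & SPEC =====
def Spec_solution (A : Int) (B : Int) (C : Int) (D : Int) (out : Int) : Prop := out = solution_alt A B C D
instance (A : Int) (B : Int) (C : Int) (D : Int) (out : Int) : Decidable (Spec_solution A B C D out) := by unfold Spec_solution; infer_instance

-- ===== CLAIM (what is proved, stated in full; the proofs are below) =====
def Claim_equal_solution : Prop := ∀ (A : Int) (B : Int) (C : Int) (D : Int), Dom_solution A B C D → Spec_solution A B C D (solution A B C D)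

-- ===== LEMMAS AND PROOFS =====

-- the 24 permutations genPerms produces for 4 symbols, in its own order
def G24 (a b c d : Int) : List (List Int) := [[a,b,c,d],[a,b,d,c],[a,c,b,d],[a,c,d,b],[a,d,b,c],[a,d,c,b],[b,a,c,d],[b,a,d,c],[b,c,a,d],[b,c,d,a],[b,d,a,c],[b,d,c,a],[c,a,b,d],[c,a,d,b],[c,b,a,d],[c,b,d,a],[c,d,a,b],[c,d,b,a],[d,a,b,c],[d,a,c,b],[d,b,a,c],[d,b,c,a],[d,c,a,b],[d,c,b,a]]

theorem genPerms_eval (a b c d : Int) :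
    genPerms 5 [a,b,c,d] [] [false,false,false,false] = G24 a b c d := rfl

def toTime (p : List Int) : Int × Int :=
  (PySem.List.pyGetD p 0 0 * 10 + PySem.List.pyGetD p 1 0,
   PySem.List.pyGetD p 2 0 * 10 + PySem.List.pyGetD p 3 0)

def addStep (s : PySem.Set (Int × Int)) (p : List Int) : PySem.Set (Int × Int) :=
  if isValidTime (toTime p).1 (toTime p).2 then PySem.Set.add s (toTime p) else s

theorem solution_eq (a b c d : Int) :
    solution a b c d = (((G24 a b c d).foldl addStep PySem.Set.empty).length : Int) := by
  simp only [solution]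
  rw [show ([a,b,c,d] : List Int).length = 4 from rfl]
  rw [show List.replicate 4 false = [false,false,false,false] from rfl]
  rw [show (4 : Nat) + 1 = 5 from rfl]
  rw [genPerms_eval]
  rw [show (fun (s : PySem.Set (Int × Int)) (p : List Int) =>
    let hours := PySem.List.pyGetD p 0 0 * 10 + PySem.List.pyGetD p 1 0
    let minutes := PySem.List.pyGetD p 2 0 * 10 + PySem.List.pyGetD p 3 0
    if isValidTime hours minutes then PySem.Set.add s (hours, minutes) else s) = addStep from rfl]

theorem mem_foldl_addStep (l : List (List Int)) (s : PySem.Set (Int × Int)) (y : Int × Int) :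
    (y ∈ l.foldl addStep s)
    ↔ y ∈ s ∨ ∃ p ∈ l, isValidTime (toTime p).1 (toTime p).2 ∧ y = toTime p := by
  induction l generalizing s with
  | nil => simp
  | cons p t ih =>
    simp only [List.foldl_cons, addStep]
    by_cases h : isValidTime (toTime p).1 (toTime p).2
    · simp only [h, ite_true, ih, PySem.Set.mem_add, List.exists_mem_cons_iff, true_and]
      tauto
    · simp only [if_neg h, ih, List.exists_mem_cons_iff]
      simp only [Bool.not_eq_true] at h
      simp [h]

theorem nodup_foldl_addStep (l : List (List Int)) (s : PySem.Set (Int × Int)) (hs : s.Nodup) :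
    (l.foldl addStep s).Nodup := by
  induction l generalizing s with
  | nil => exact hs
  | cons p t ih =>
    simp only [List.foldl_cons, addStep]
    split
    · exact ih _ (PySem.Set.nodup_add _ _ hs)
    · exact ih _ hs

-- B's loop bodies as named functions (identical shapes; used to state its invariants)
def minStep (hour : Int) (s : PySem.Set (Int × Int)) (minute : Int) : PySem.Set (Int × Int) :=
  if 0 ≤ minute ∧ minute < 60 then PySem.Set.add s (hour, minute) else s

def restOf (a b c d i j : Int) : List Int :=
  ((PySem.List.pyRange 0 4 1).filter (fun k => decide (k ≠ i) && decide (k ≠ j))).map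
    (fun k => PySem.List.pyGetD [a,b,c,d] k 0)

def hourOf (a b c d i j : Int) : Int :=
  PySem.List.pyGetD [a,b,c,d] i 0 * 10 + PySem.List.pyGetD [a,b,c,d] j 0

def jStep (a b c d i : Int) (s : PySem.Set (Int × Int)) (j : Int) : PySem.Set (Int × Int) :=
  if i = j then s
  else if ¬ (0 ≤ hourOf a b c d i j ∧ hourOf a b c d i j < 24) then s
  else
    [PySem.List.pyGetD (restOf a b c d i j) 0 0 * 10 + PySem.List.pyGetD (restOf a b c d i j) 1 0,
     PySem.List.pyGetD (restOf a b c d i j) 1 0 * 10 + PySem.List.pyGetD (restOf a b c d i j) 0 0].foldl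
      (minStep (hourOf a b c d i j)) s

def iStep (a b c d : Int) (s : PySem.Set (Int × Int)) (i : Int) : PySem.Set (Int × Int) :=
  (PySem.List.pyRange 0 4 1).foldl (jStep a b c d i) s

theorem solution_alt_eq (a b c d : Int) :
    solution_alt a b c d = (((PySem.List.pyRange 0 4 1).foldl (iStep a b c d) PySem.Set.empty).length : Int) := by
  rfl

-- what one j-iteration can add
def QB (a b c d i j : Int) (y : Int × Int) : Prop :=
  i ≠ j ∧ (0 ≤ hourOf a b c d i j ∧ hourOf a b c d i j < 24) ∧
    (((0 ≤ PySem.List.pyGetD (restOf a b c d i j) 0 0 * 10 + PySem.List.pyGetD (restOf a b c d i j) 1 0 ∧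
        PySem.List.pyGetD (restOf a b c d i j) 0 0 * 10 + PySem.List.pyGetD (restOf a b c d i j) 1 0 < 60) ∧
       y = (hourOf a b c d i j, PySem.List.pyGetD (restOf a b c d i j) 0 0 * 10 + PySem.List.pyGetD (restOf a b c d i j) 1 0)) ∨
     ((0 ≤ PySem.List.pyGetD (restOf a b c d i j) 1 0 * 10 + PySem.List.pyGetD (restOf a b c d i j) 0 0 ∧
        PySem.List.pyGetD (restOf a b c d i j) 1 0 * 10 + PySem.List.pyGetD (restOf a b c d i j) 0 0 < 60) ∧
       y = (hourOf a b c d i j, PySem.List.pyGetD (restOf a b c d i j) 1 0 * 10 + PySem.List.pyGetD (restOf a b c d i j) 0 0)))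

theorem mem_minStep (hour m : Int) (s : PySem.Set (Int × Int)) (y : Int × Int) :
    y ∈ minStep hour s m ↔ y ∈ s ∨ ((0 ≤ m ∧ m < 60) ∧ y = (hour, m)) := by
  unfold minStep
  split
  · rename_i h
    simp [PySem.Set.mem_add, h]
  · rename_i h
    simp [h]

theorem mem_jStep (a b c d i : Int) (s : PySem.Set (Int × Int)) (j : Int) (y : Int × Int) :
    y ∈ jStep a b c d i s j ↔ y ∈ s ∨ QB a b c d i j y := by
  unfold jStep QB
  by_cases hij : i = j
  · simp [hij]
  · simp only [if_neg hij]
    by_cases hh : (0 ≤ hourOf a b c d i j ∧ hourOf a b c d i j < 24)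
    · simp only [hh, not_true_eq_false, if_false, List.foldl_cons, List.foldl_nil,
        mem_minStep, true_and]
      tauto
    · simp [hh, hij]

theorem nodup_jStep (a b c d i : Int) (s : PySem.Set (Int × Int)) (j : Int) (hs : s.Nodup) :
    (jStep a b c d i s j).Nodup := by
  unfold jStep
  split
  · exact hs
  · split
    · exact hs
    · simp only [List.foldl_cons, List.foldl_nil]
      unfold minStep
      split <;> split <;>
        first
        | exact PySem.Set.nodup_add _ _ (PySem.Set.nodup_add _ _ hs)
        | exact PySem.Set.nodup_add _ _ hs
        | exact hs

-- one generic loop level: if a step can only add described elements, so does its fold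
theorem mem_foldl_level (g : PySem.Set (Int × Int) → Int → PySem.Set (Int × Int))
    (Q : Int → Int × Int → Prop)
    (hg : ∀ s j y, y ∈ g s j ↔ y ∈ s ∨ Q j y)
    (l : List Int) (s : PySem.Set (Int × Int)) (y : Int × Int) :
    y ∈ l.foldl g s ↔ y ∈ s ∨ ∃ j ∈ l, Q j y := by
  induction l generalizing s with
  | nil => simp
  | cons j t ih =>
    simp only [List.foldl_cons, ih, hg, List.exists_mem_cons_iff]
    tauto

theorem nodup_foldl_level (g : PySem.Set (Int × Int) → Int → PySem.Set (Int × Int))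
    (hg : ∀ s j, s.Nodup → (g s j).Nodup)
    (l : List Int) (s : PySem.Set (Int × Int)) (hs : s.Nodup) :
    (l.foldl g s).Nodup := by
  induction l generalizing s with
  | nil => exact hs
  | cons j t ih => exact ih _ (hg _ _ hs)

theorem mem_B (a b c d : Int) (y : Int × Int) :
    y ∈ (PySem.List.pyRange 0 4 1).foldl (iStep a b c d) PySem.Set.empty ↔
    ∃ i ∈ (PySem.List.pyRange 0 4 1), ∃ j ∈ (PySem.List.pyRange 0 4 1), QB a b c d i j y := by
  rw [mem_foldl_level (iStep a b c d)
    (fun i y => ∃ j ∈ (PySem.List.pyRange 0 4 1), QB a b c d i j y)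
    (fun s i y => mem_foldl_level (jStep a b c d i) (QB a b c d i) (mem_jStep a b c d i) _ s y)]
  simp [PySem.Set.empty]

theorem QB_diag (a b c d i : Int) (y : Int × Int) : QB a b c d i i y ↔ False := by
  simp [QB]

theorem toTime_explicit (p0 p1 p2 p3 : Int) :
    toTime [p0, p1, p2, p3] = (p0 * 10 + p1, p2 * 10 + p3) := rfl

theorem QB_red_01 (a b c d : Int) (y : Int × Int) :
    QB a b c d 0 1 y ↔ (0 ≤ a * 10 + b ∧ a * 10 + b < 24) ∧
      (((0 ≤ c * 10 + d ∧ c * 10 + d < 60) ∧ y = (a * 10 + b, c * 10 + d)) ∨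
       ((0 ≤ d * 10 + c ∧ d * 10 + c < 60) ∧ y = (a * 10 + b, d * 10 + c))) :=
  and_iff_right (by norm_num)

theorem QB_red_02 (a b c d : Int) (y : Int × Int) :
    QB a b c d 0 2 y ↔ (0 ≤ a * 10 + c ∧ a * 10 + c < 24) ∧
      (((0 ≤ b * 10 + d ∧ b * 10 + d < 60) ∧ y = (a * 10 + c, b * 10 + d)) ∨
       ((0 ≤ d * 10 + b ∧ d * 10 + b < 60) ∧ y = (a * 10 + c, d * 10 + b))) :=
  and_iff_right (by norm_num)

theorem QB_red_03 (a b c d : Int) (y : Int × Int) :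
    QB a b c d 0 3 y ↔ (0 ≤ a * 10 + d ∧ a * 10 + d < 24) ∧
      (((0 ≤ b * 10 + c ∧ b * 10 + c < 60) ∧ y = (a * 10 + d, b * 10 + c)) ∨
       ((0 ≤ c * 10 + b ∧ c * 10 + b < 60) ∧ y = (a * 10 + d, c * 10 + b))) :=
  and_iff_right (by norm_num)

theorem QB_red_10 (a b c d : Int) (y : Int × Int) :
    QB a b c d 1 0 y ↔ (0 ≤ b * 10 + a ∧ b * 10 + a < 24) ∧
      (((0 ≤ c * 10 + d ∧ c * 10 + d < 60) ∧ y = (b * 10 + a, c * 10 + d)) ∨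
       ((0 ≤ d * 10 + c ∧ d * 10 + c < 60) ∧ y = (b * 10 + a, d * 10 + c))) :=
  and_iff_right (by norm_num)

theorem QB_red_12 (a b c d : Int) (y : Int × Int) :
    QB a b c d 1 2 y ↔ (0 ≤ b * 10 + c ∧ b * 10 + c < 24) ∧
      (((0 ≤ a * 10 + d ∧ a * 10 + d < 60) ∧ y = (b * 10 + c, a * 10 + d)) ∨
       ((0 ≤ d * 10 + a ∧ d * 10 + a < 60) ∧ y = (b * 10 + c, d * 10 + a))) :=
  and_iff_right (by norm_num)

theorem QB_red_13 (a b c d : Int) (y : Int × Int) :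
    QB a b c d 1 3 y ↔ (0 ≤ b * 10 + d ∧ b * 10 + d < 24) ∧
      (((0 ≤ a * 10 + c ∧ a * 10 + c < 60) ∧ y = (b * 10 + d, a * 10 + c)) ∨
       ((0 ≤ c * 10 + a ∧ c * 10 + a < 60) ∧ y = (b * 10 + d, c * 10 + a))) :=
  and_iff_right (by norm_num)

theorem QB_red_20 (a b c d : Int) (y : Int × Int) :
    QB a b c d 2 0 y ↔ (0 ≤ c * 10 + a ∧ c * 10 + a < 24) ∧
      (((0 ≤ b * 10 + d ∧ b * 10 + d < 60) ∧ y = (c * 10 + a, b * 10 + d)) ∨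
       ((0 ≤ d * 10 + b ∧ d * 10 + b < 60) ∧ y = (c * 10 + a, d * 10 + b))) :=
  and_iff_right (by norm_num)

theorem QB_red_21 (a b c d : Int) (y : Int × Int) :
    QB a b c d 2 1 y ↔ (0 ≤ c * 10 + b ∧ c * 10 + b < 24) ∧
      (((0 ≤ a * 10 + d ∧ a * 10 + d < 60) ∧ y = (c * 10 + b, a * 10 + d)) ∨
       ((0 ≤ d * 10 + a ∧ d * 10 + a < 60) ∧ y = (c * 10 + b, d * 10 + a))) :=
  and_iff_right (by norm_num)

theorem QB_red_23 (a b c d : Int) (y : Int × Int) :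
    QB a b c d 2 3 y ↔ (0 ≤ c * 10 + d ∧ c * 10 + d < 24) ∧
      (((0 ≤ a * 10 + b ∧ a * 10 + b < 60) ∧ y = (c * 10 + d, a * 10 + b)) ∨
       ((0 ≤ b * 10 + a ∧ b * 10 + a < 60) ∧ y = (c * 10 + d, b * 10 + a))) :=
  and_iff_right (by norm_num)

theorem QB_red_30 (a b c d : Int) (y : Int × Int) :
    QB a b c d 3 0 y ↔ (0 ≤ d * 10 + a ∧ d * 10 + a < 24) ∧
      (((0 ≤ b * 10 + c ∧ b * 10 + c < 60) ∧ y = (d * 10 + a, b * 10 + c)) ∨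
       ((0 ≤ c * 10 + b ∧ c * 10 + b < 60) ∧ y = (d * 10 + a, c * 10 + b))) :=
  and_iff_right (by norm_num)

theorem QB_red_31 (a b c d : Int) (y : Int × Int) :
    QB a b c d 3 1 y ↔ (0 ≤ d * 10 + b ∧ d * 10 + b < 24) ∧
      (((0 ≤ a * 10 + c ∧ a * 10 + c < 60) ∧ y = (d * 10 + b, a * 10 + c)) ∨
       ((0 ≤ c * 10 + a ∧ c * 10 + a < 60) ∧ y = (d * 10 + b, c * 10 + a))) :=
  and_iff_right (by norm_num)

theorem QB_red_32 (a b c d : Int) (y : Int × Int) :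
    QB a b c d 3 2 y ↔ (0 ≤ d * 10 + c ∧ d * 10 + c < 24) ∧
      (((0 ≤ a * 10 + b ∧ a * 10 + b < 60) ∧ y = (d * 10 + c, a * 10 + b)) ∨
       ((0 ≤ b * 10 + a ∧ b * 10 + a < 60) ∧ y = (d * 10 + c, b * 10 + a))) :=
  and_iff_right (by norm_num)

-- the heart: the arrangements B tries are exactly A's 24 permutations
theorem main_mem (a b c d : Int) (y : Int × Int) :
    (∃ i ∈ (PySem.List.pyRange 0 4 1), ∃ j ∈ (PySem.List.pyRange 0 4 1), QB a b c d i j y) ↔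
    ∃ p ∈ G24 a b c d, isValidTime (toTime p).1 (toTime p).2 ∧ y = toTime p := by
  rw [show PySem.List.pyRange 0 4 1 = [0,1,2,3] from rfl]
  simp only [List.exists_mem_cons_iff, List.not_mem_nil, false_and, exists_false, or_false]
  simp only [QB_diag, false_or, G24,
    QB_red_01, QB_red_02, QB_red_03, QB_red_10, QB_red_12, QB_red_13,
    QB_red_20, QB_red_21, QB_red_23, QB_red_30, QB_red_31, QB_red_32,
    List.exists_mem_cons_iff, List.not_mem_nil, false_and, exists_false, or_false,
    toTime_explicit, isValidTime, Bool.and_eq_true, decide_eq_true_eq,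
    and_or_left, and_assoc, or_assoc]

-- ===== VERDICT (by name: the statement is the Claim_ definition above) =====
theorem solution_spec : Claim_equal_solution := by
  intro a b c d hDom
  unfold Spec_solution
  rw [solution_eq, solution_alt_eq]
  congr 1
  have hnd1 : ((G24 a b c d).foldl addStep PySem.Set.empty).Nodup :=
    nodup_foldl_addStep _ _ (by simp [PySem.Set.empty])
  have hnd2 : ((PySem.List.pyRange 0 4 1).foldl (iStep a b c d) PySem.Set.empty).Nodup :=
    nodup_foldl_level _ (fun s i hs => nodup_foldl_level _ (nodup_jStep a b c d i) _ s hs) _ _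
      (by simp [PySem.Set.empty])
  have hperm : ((G24 a b c d).foldl addStep PySem.Set.empty).Perm
      ((PySem.List.pyRange 0 4 1).foldl (iStep a b c d) PySem.Set.empty) := by
    rw [List.perm_ext_iff_of_nodup hnd1 hnd2]
    intro x
    rw [mem_foldl_addStep, mem_B, main_mem]
    simp [PySem.Set.empty]
  exact hperm.length_eq
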